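-- pv_equiv track=rewrite | github.com/Doctor3131/PraktikumASA | Pertemuan4/(medium)GreatTeacherOnizuka/onizuka.py | cariID
-- ===== SOURCE A (Python) =====
-- def cariID(data, N):
--     kiri, kanan = 0, N
--
--     while kiri <= kanan:
--         tengah = (kiri + kanan) // 2
--
--         if tengah < len(data) and data[tengah] == tengah:
--             kiri = tengah + 1
--         else:
--             kanan = tengah - 1
--
--     return kiri
-- ===== SOURCE B (Python) =====
-- def cariID(data, N):
--     # Recursive binary search carrying (start, size) instead of an iterative (kiri, kanan) loop.
--     def go(kiri, n):
--         if n <= 0: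
--             return kiri
--         half = (n - 1) // 2
--         tengah = kiri + half
--         if tengah < len(data) and data[tengah] == tengah:
--             return go(tengah + 1, n - 1 - half)
--         return go(kiri, half)
--     return go(0, N + 1)
-- ===== Notes on version B (the rewrite author's own statement) =====
-- stated objective: alternative
-- what changed: Replaced the iterative while-loop over (kiri, kanan) bounds with a recursive binary search over (start, size): the midpoint is computed as kiri + (n-1)//2 and each branch recurses on the remaining size, no mutable state.
import Mathlib
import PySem

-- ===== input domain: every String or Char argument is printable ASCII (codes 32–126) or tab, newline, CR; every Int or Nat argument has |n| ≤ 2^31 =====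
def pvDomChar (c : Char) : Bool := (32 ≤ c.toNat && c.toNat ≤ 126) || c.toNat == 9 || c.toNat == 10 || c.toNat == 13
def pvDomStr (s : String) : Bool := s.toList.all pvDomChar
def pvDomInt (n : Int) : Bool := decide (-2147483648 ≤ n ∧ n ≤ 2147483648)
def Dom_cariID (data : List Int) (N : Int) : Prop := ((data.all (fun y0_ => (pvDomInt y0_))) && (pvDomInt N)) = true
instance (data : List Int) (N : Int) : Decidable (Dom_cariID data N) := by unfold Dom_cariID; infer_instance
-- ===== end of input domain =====

-- B rewrites A's iterative while-loop binary search as a recursion on (start, size); same values everywhere.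

-- ===== PORT A =====
-- the while loop of A, state (kiri, kanan)
def cariIDLoop (data : List Int) (kiri kanan : Int) : Int :=
  if _h : kiri ≤ kanan then
    let tengah := PySem.Int.floordiv (kiri + kanan) 2
    if tengah < (data.length : Int) ∧ PySem.List.pyGet? data tengah = some tengah then
      cariIDLoop data (tengah + 1) kanan
    else
      cariIDLoop data kiri (tengah - 1)
  else
    kiri
  termination_by (kanan - kiri + 1).toNat
  decreasing_by
    all_goals
      have hb := PySem.Int.floordiv_two_mid_bounds (lo := kiri) (hi := kanan) _h
      omega

def cariID (data : List Int) (N : Int) : Int := cariIDLoop data 0 N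

-- ===== PORT B =====
-- B's inner recursion `go`, carrying the start index and the size of the search window
def cariIDGo (data : List Int) (kiri n : Int) : Int :=
  if _h : n ≤ 0 then
    kiri
  else
    let half := PySem.Int.floordiv (n - 1) 2
    let tengah := kiri + half
    if tengah < (data.length : Int) ∧ PySem.List.pyGet? data tengah = some tengah then
      cariIDGo data (tengah + 1) (n - 1 - half)
    else
      cariIDGo data kiri half
  termination_by n.toNat
  decreasing_by
    all_goals
      have hb := PySem.Int.floordiv_two_mid_bounds (lo := 0) (hi := n - 1) (by omega)
      simp only [zero_add] at hb
      omega

def cariID_alt (data : List Int) (N : Int) : Int := cariIDGo data 0 (N + 1)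

-- ===== PRECONDITION & SPEC =====
def Spec_cariID (data : List Int) (N : Int) (out : Int) : Prop := out = cariID_alt data N
instance (data : List Int) (N : Int) (out : Int) : Decidable (Spec_cariID data N out) := by unfold Spec_cariID; infer_instance

-- ===== CLAIM (what is proved, stated in full; the proofs are below) =====
def Claim_equal_cariID : Prop := ∀ (data : List Int) (N : Int), Dom_cariID data N → Spec_cariID data N (cariID data N)

-- ===== LEMMAS AND PROOFS =====

theorem midpoint_shift (kiri kanan : Int) :
    kiri + PySem.Int.floordiv (kanan - kiri + 1 - 1) 2 = PySem.Int.floordiv (kiri + kanan) 2 := by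
  rw [PySem.Int.floordiv_eq_ediv_of_pos (by omega), PySem.Int.floordiv_eq_ediv_of_pos (by omega)]
  omega

theorem loop_eq_go_aux (data : List Int) :
    ∀ (m : Nat) (kiri kanan : Int), (kanan - kiri + 1).toNat ≤ m →
      cariIDLoop data kiri kanan = cariIDGo data kiri (kanan - kiri + 1) := by
  intro m
  induction m with
  | zero =>
    intro kiri kanan hm
    rw [cariIDLoop, cariIDGo]
    rw [dif_neg (show ¬ kiri ≤ kanan by omega), dif_pos (show kanan - kiri + 1 ≤ 0 by omega)]
  | succ m ih =>
    intro kiri kanan hm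
    by_cases h : kiri ≤ kanan
    · have hmid := PySem.Int.floordiv_two_mid_bounds (lo := kiri) (hi := kanan) h
      rw [cariIDLoop, cariIDGo]
      rw [dif_pos h, dif_neg (show ¬ kanan - kiri + 1 ≤ 0 by omega)]
      simp only [← midpoint_shift kiri kanan]
      set t := kiri + PySem.Int.floordiv (kanan - kiri + 1 - 1) 2 with ht
      have hlink : t = PySem.Int.floordiv (kiri + kanan) 2 := midpoint_shift kiri kanan
      split_ifs with hc
      · rw [ih (t + 1) kanan (by omega)]
        congr 1
        omega
      · rw [ih kiri (t - 1) (by omega)]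
        congr 1
        omega
    · rw [cariIDLoop, cariIDGo]
      rw [dif_neg h, dif_pos (show kanan - kiri + 1 ≤ 0 by omega)]

theorem loop_eq_go (data : List Int) (kiri kanan : Int) :
    cariIDLoop data kiri kanan = cariIDGo data kiri (kanan - kiri + 1) := by
  exact loop_eq_go_aux data (kanan - kiri + 1).toNat kiri kanan le_rfl

-- ===== VERDICT (by name: the statement is the Claim_ definition above) =====
theorem cariID_spec : Claim_equal_cariID := by
  intro data N _
  show cariID data N = cariID_alt data N
  simpa [cariID, cariID_alt] using loop_eq_go data 0 N
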